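-- pv_equiv track=rewrite | github.com/ysparrk/Algorithm | 프로그래머스/lv3/12938. 최고의 집합/최고의 집합.py | solution
-- ===== SOURCE A (Python) =====
-- def solution(n, s):
--     '''
--     원소간 차이가 제일 나지 않도록 -> s/n의 몫, 나머지
--     1. 몫이 0인 경우 -> 불가능
--     2. 나머지가 0인 경우 -> 같은 수 집합
--     3. 몫에서 1씩 더하기
--     '''
--     answer = []
--     q, r = divmod(s, n)
--     if q == 0:
--         answer = [-1]
--     elif r == 0:
--         answer = [q for _ in range(n)]
--     else:
--         answer = [q] * (n - r) + [q + 1] * r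
--
--     return answer
-- ===== SOURCE B (Python) =====
-- def solution(n, s):
--     if s // n == 0:
--         return [-1]
--     answer = []
--     while n > 0:
--         x = -(-s // n)  # ceiling division: greedily peel off the largest remaining element
--         answer.append(x)
--         s -= x
--         n -= 1
--     answer.reverse()
--     return answer
-- ===== Notes on version B (the rewrite author's own statement) =====
-- stated objective: alternative
-- what changed: B replaces A's divmod plus two-block list concatenation by a greedy loop that repeatedly peels off the largest remaining element ceil(s/n), subtracting it from s and decrementing n, then reverses the accumulated list.
import Mathlib
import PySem

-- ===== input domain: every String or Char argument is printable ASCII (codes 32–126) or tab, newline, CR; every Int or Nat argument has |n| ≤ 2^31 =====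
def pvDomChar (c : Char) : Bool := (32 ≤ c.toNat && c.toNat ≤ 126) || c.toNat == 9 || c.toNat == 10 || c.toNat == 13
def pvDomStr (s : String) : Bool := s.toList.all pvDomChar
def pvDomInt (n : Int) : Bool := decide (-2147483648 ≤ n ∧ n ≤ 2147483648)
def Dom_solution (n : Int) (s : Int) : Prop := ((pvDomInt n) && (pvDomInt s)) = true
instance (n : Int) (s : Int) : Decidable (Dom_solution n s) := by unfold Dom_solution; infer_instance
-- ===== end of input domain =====

-- B replaces A's divmod + two-block concatenation by a greedy loop peeling off ceil(s/n) each step; objective: alternative.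

-- ===== PORT A =====
def solution (n : Int) (s : Int) : List Int :=
  match PySem.Int.divmod? s n with
  | none => []   -- unreachable under Pre_solution (n ≠ 0): Python raises ZeroDivisionError here
  | some (q, r) =>
    if q = 0 then [-1]
    else if r = 0 then (PySem.List.pyRange 0 n 1).map (fun _ => q)
    else List.replicate (n - r).toNat q ++ List.replicate r.toNat (q + 1)

-- ===== PORT B =====
-- B's while loop: state (n, s, answer); each step appends x = -((-s) // n), subtracts x from s, decrements n.
def solGreedyLoop (n : Int) (s : Int) (acc : List Int) : List Int :=
  if _h : 0 < n then
    let x := -(PySem.Int.floordiv (-s) n)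
    solGreedyLoop (n - 1) (s - x) (acc ++ [x])
  else acc
termination_by n.toNat
decreasing_by omega

def solution_alt (n : Int) (s : Int) : List Int :=
  if PySem.Int.floordiv s n = 0 then [-1]
  else (solGreedyLoop n s []).reverse

-- ===== PRECONDITION & SPEC =====
-- Pre_ excludes exactly n = 0, where Python's divmod(s, n) raises ZeroDivisionError (B raises too).
def Pre_solution (n : Int) (s : Int) : Prop := n ≠ 0
instance (n : Int) (s : Int) : Decidable (Pre_solution n s) := by unfold Pre_solution; infer_instance
def pvWitness_solution : Int × Int := (3, 11)

def Spec_solution (n : Int) (s : Int) (out : List Int) : Prop := out = solution_alt n s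
instance (n : Int) (s : Int) (out : List Int) : Decidable (Spec_solution n s out) := by unfold Spec_solution; infer_instance

-- ===== CLAIM (what is proved, stated in full; the proofs are below) =====
def Claim_equal_solution : Prop := ∀ (n : Int) (s : Int), Dom_solution n s → Pre_solution n s → Spec_solution n s (solution n s)

-- ===== LEMMAS AND PROOFS =====

-- The greedy loop, for 0 < n, produces acc ++ (r copies of q+1, then n-r copies of q)
-- where q = s // n, r = s % n; quotient/remainder are preserved step by step.
lemma solGreedyLoop_eq (k : Nat) : ∀ (n s : Int) (acc : List Int), n.toNat = k → 0 < n →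
    solGreedyLoop n s acc
      = acc ++ (List.replicate (PySem.Int.mod s n).toNat (PySem.Int.floordiv s n + 1)
                ++ List.replicate (n - PySem.Int.mod s n).toNat (PySem.Int.floordiv s n)) := by
  induction k using Nat.strong_induction_on with
  | _ k ih =>
    intro n s acc hk hn
    set q := PySem.Int.floordiv s n with hq
    set r := PySem.Int.mod s n with hr
    have hsum : q * n + r = s := PySem.Int.floordiv_mul_add_mod s n
    have hr0 : 0 ≤ r := PySem.Int.mod_nonneg s hn
    have hrn : r < n := PySem.Int.mod_lt s hn
    rw [solGreedyLoop, dif_pos hn]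
    have hceil : -(PySem.Int.floordiv (-s) n) = (if r = 0 then q else q + 1) := by
      rw [PySem.Int.neg_floordiv_neg_eq_iff_of_pos hn]
      split_ifs with h0
      · constructor <;> nlinarith
      · have hrpos : 0 < r := by omega
        constructor <;> nlinarith
    by_cases hlast : n = 1
    · -- last iteration: r = 0, element is q = s
      have hr0' : r = 0 := by omega
      rw [hceil, if_pos hr0', solGreedyLoop, dif_neg (by omega)]
      simp [hr0', hlast]
    · have hn1 : 0 < n - 1 := by omega
      by_cases h0 : r = 0
      · -- s - q = q * (n - 1): quotient stays q, remainder stays 0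
        have hfd : PySem.Int.floordiv (s - q) (n - 1) = q := by
          rw [PySem.Int.floordiv_eq_iff_of_pos hn1]; constructor <;> nlinarith
        have hmd : PySem.Int.mod (s - q) (n - 1) = 0 := by
          have := PySem.Int.floordiv_mul_add_mod (s - q) (n - 1)
          rw [hfd] at this; nlinarith
        rw [hceil, if_pos h0, ih (n - 1).toNat (by omega) (n - 1) (s - q) _ rfl hn1,
            hfd, hmd, h0]
        have h1 : (n - 1 - 0).toNat = n.toNat - 1 := by omega
        simp [h1]
        rw [show n.toNat = (n.toNat - 1) + 1 by omega, List.replicate_succ]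
        simp
      · -- s - (q+1) = q * (n - 1) + (r - 1): quotient stays q, remainder drops by 1
        have hrpos : 0 < r := by omega
        have hfd : PySem.Int.floordiv (s - (q + 1)) (n - 1) = q := by
          rw [PySem.Int.floordiv_eq_iff_of_pos hn1]; constructor <;> nlinarith
        have hmd : PySem.Int.mod (s - (q + 1)) (n - 1) = r - 1 := by
          have := PySem.Int.floordiv_mul_add_mod (s - (q + 1)) (n - 1)
          rw [hfd] at this; nlinarith
        rw [hceil, if_neg h0, ih (n - 1).toNat (by omega) (n - 1) (s - (q + 1)) _ rfl hn1,
            hfd, hmd]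
        have h1 : (n - 1 - (r - 1)).toNat = (n - r).toNat := by omega
        have h2 : r.toNat = ((r - 1).toNat) + 1 := by omega
        rw [h1, h2, List.replicate_succ]
        simp

-- ===== VERDICT (by name: the statement is the Claim_ definition above) =====
theorem solution_spec : Claim_equal_solution := by
  intro n s _ hpre
  have hn : n ≠ 0 := hpre
  unfold Spec_solution solution solution_alt
  have hdm : PySem.Int.divmod? s n = some (PySem.Int.floordiv s n, PySem.Int.mod s n) := by
    simp [PySem.Int.divmod?, PySem.Int.floordiv, PySem.Int.mod, hn]
  rw [hdm]
  dsimp only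
  set q := PySem.Int.floordiv s n with hq
  set r := PySem.Int.mod s n with hr
  by_cases hq0 : q = 0
  · rw [if_pos hq0, if_pos hq0]
  · rw [if_neg hq0, if_neg hq0]
    rcases lt_or_gt_of_ne hn with hneg | hpos
    · -- n < 0: the loop never runs and both of A's blocks are empty
      have hrb := PySem.Int.mod_neg_bounds s hneg
      rw [solGreedyLoop, dif_neg (by omega)]
      by_cases hr0 : r = 0
      · rw [if_pos hr0, PySem.List.pyRange_one_eq_nil (by omega)]
        simp
      · rw [if_neg hr0]
        have h1 : (n - r).toNat = 0 := by omega
        have h2 : r.toNat = 0 := by omega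
        simp [h1, h2]
    · -- n > 0
      rw [solGreedyLoop_eq n.toNat n s [] rfl hpos, ← hq, ← hr]
      have hr0' : 0 ≤ r := PySem.Int.mod_nonneg s hpos
      by_cases hr0 : r = 0
      · rw [if_pos hr0, hr0]
        rw [List.map_const', PySem.List.length_pyRange_one]
        simp
      · rw [if_neg hr0]
        simp
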